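-- pv_equiv track=rewrite | github.com/domi131domi/RadioCheck | main_controller.py | make_files_distinct
-- ===== SOURCE A (Python) =====
-- def make_files_distinct(files):
--     names = {}
--     for file in files:
--         name = str(file).split('.')[0]
--         ext = str(file).split('.')[1]
--         if name in names:
--             if ext == 'wav':
--                 names[name] = file
--         else:
--             names[name] = file
--     return names.values()
-- ===== SOURCE B (Python) =====
-- def make_files_distinct(files):
--     # group files by base name (first pass), then pick per group: first file,
--     # overwritten by any later file whose extension is 'wav' (second pass)
--     groups = {}
--     for file in files:
--         name = str(file).split('.')[0]
--         ext = str(file).split('.')[1]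
--         groups[name] = groups.get(name, []) + [(file, ext)]
--     result = {}
--     for name, group in groups.items():
--         chosen = group[0][0]
--         for f, ext in group[1:]:
--             if ext == 'wav':
--                 chosen = f
--         result[name] = chosen
--     return result.values()
-- ===== Notes on version B (the rewrite author's own statement) =====
-- stated objective: alternative
-- what changed: A dedupes in a single pass over files with a conditional overwrite into one dict; B first groups the files by base name into an ordered dict of lists, then in a second pass selects one file per group (first file, overwritten by any later wav).
import Mathlib
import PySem

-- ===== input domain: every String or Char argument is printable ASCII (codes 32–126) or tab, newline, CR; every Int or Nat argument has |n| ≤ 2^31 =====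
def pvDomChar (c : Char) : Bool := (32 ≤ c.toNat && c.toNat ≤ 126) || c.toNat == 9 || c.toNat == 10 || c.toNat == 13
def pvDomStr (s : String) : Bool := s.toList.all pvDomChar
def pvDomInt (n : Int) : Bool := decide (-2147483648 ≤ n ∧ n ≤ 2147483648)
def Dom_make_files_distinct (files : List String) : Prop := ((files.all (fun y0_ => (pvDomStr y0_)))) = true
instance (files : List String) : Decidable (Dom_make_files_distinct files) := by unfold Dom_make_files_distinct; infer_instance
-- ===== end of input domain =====

-- B replaces A's single conditional-overwrite dict loop by a two-pass decomposition
-- (group files by base name, then choose one file per group); objective: alternative.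
-- Both Pythons return a dict_values view; the equivalence is about its contents as a list.

-- shared parsing of one filename: str(file).split('.')[0] and str(file).split('.')[1]
def pvParts (file : String) : List String := (PySem.Str.split? file ".").getD []
def pvName (file : String) : String := (PySem.List.pyGet? (pvParts file) 0).getD ""
-- the `none` case of pyGet? below is Python's IndexError (no '.'); excluded by Pre_
def pvExt (file : String) : String := (PySem.List.pyGet? (pvParts file) 1).getD ""

-- ===== PORT A =====
def pvStepA (names : PySem.Dict String String) (file : String) : PySem.Dict String String :=
  if names.contains (pvName file) then
    if pvExt file = "wav" then names.insert (pvName file) file else names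
  else
    names.insert (pvName file) file

def make_files_distinct (files : List String) : List String :=
  (files.foldl pvStepA PySem.Dict.empty).values

-- ===== PORT B =====
def pvStepB (g : PySem.Dict String (List (String × String))) (file : String) :
    PySem.Dict String (List (String × String)) :=
  g.modify (pvName file) [] (fun l => l ++ [(file, pvExt file)])

-- chosen = group[0][0], overwritten by any later wav (the inner loop of B's second pass)
def pvChoose (first : String) (rest : List (String × String)) : String :=
  rest.foldl (fun chosen fe => if fe.2 = "wav" then fe.1 else chosen) first

def pvStepR (r : PySem.Dict String String) (p : String × List (String × String)) :
    PySem.Dict String String :=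
  match p.2 with
  | [] => r  -- unreachable: every group built by pvStepB is nonempty (Python indexes group[0])
  | fe :: rest => r.insert p.1 (pvChoose fe.1 rest)

def make_files_distinct_alt (files : List String) : List String :=
  let groups := files.foldl pvStepB PySem.Dict.empty
  let result := groups.items.foldl pvStepR PySem.Dict.empty
  result.values

-- ===== PRECONDITION & SPEC =====
-- A raises IndexError on any filename containing no '.' (split('.')[1] is out of range);
-- exactly those inputs are excluded.
def Pre_make_files_distinct (files : List String) : Prop :=
  ∀ f ∈ files, '.' ∈ f.toList
instance (files : List String) : Decidable (Pre_make_files_distinct files) := by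
  unfold Pre_make_files_distinct; infer_instance

def pvWitness_make_files_distinct : List String := ["a.wav", "a.mp3", "b.txt"]

def Spec_make_files_distinct (files : List String) (out : List String) : Prop := out = make_files_distinct_alt files
instance (files : List String) (out : List String) : Decidable (Spec_make_files_distinct files out) := by unfold Spec_make_files_distinct; infer_instance

-- ===== CLAIM (what is proved, stated in full; the proofs are below) =====
def Claim_equal_make_files_distinct : Prop := ∀ (files : List String), Dom_make_files_distinct files → Pre_make_files_distinct files → Spec_make_files_distinct files (make_files_distinct files)

-- ===== LEMMAS AND PROOFS =====

-- the value B's second pass picks out of one group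
def pvChosen : List (String × String) → String
  | [] => ""
  | fe :: rest => pvChoose fe.1 rest

theorem pvChosen_append (l : List (String × String)) (f e : String) (hl : l ≠ []) :
    pvChosen (l ++ [(f, e)]) = if e = "wav" then f else pvChosen l := by
  cases l with
  | nil => exact absurd rfl hl
  | cons a rest => simp [pvChosen, pvChoose, List.foldl_append]

-- invariant relating A's dict to B's grouping dict, preserved by one loop step
theorem pv_step (d : PySem.Dict String String) (g : PySem.Dict String (List (String × String)))
    (file : String)
    (hk : d.keys = g.keys) (hnd : g.keys.Nodup)
    (hv : ∀ n, d.getD n "" = pvChosen (g.getD n []))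
    (hne : ∀ n, n ∈ g.keys → g.getD n [] ≠ []) :
    (pvStepA d file).keys = (pvStepB g file).keys ∧ (pvStepB g file).keys.Nodup ∧
    (∀ n, (pvStepA d file).getD n "" = pvChosen ((pvStepB g file).getD n [])) ∧
    (∀ n, n ∈ (pvStepB g file).keys → (pvStepB g file).getD n [] ≠ []) := by
  have hcont : d.contains (pvName file) = g.contains (pvName file) := by
    rw [PySem.Dict.contains_eq_decide_mem_keys, PySem.Dict.contains_eq_decide_mem_keys, hk]
  by_cases hc : g.contains (pvName file) = true
  · have hmem : pvName file ∈ g.keys := by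
      have h := (PySem.Dict.contains_eq_decide_mem_keys g (pvName file)).symm.trans hc
      exact of_decide_eq_true h
    have hold : g.getD (pvName file) [] ≠ [] := hne _ hmem
    have hgk : (pvStepB g file).keys = g.keys := by
      unfold pvStepB
      rw [PySem.Dict.keys_modify, PySem.Dict.keys_insert_of_contains _ _ hc]
    have hgd : ∀ n, (pvStepB g file).getD n [] =
        if n = pvName file then g.getD (pvName file) [] ++ [(file, pvExt file)] else g.getD n [] := by
      intro n; unfold pvStepB; rw [PySem.Dict.getD_modify]
    have hdc : d.contains (pvName file) = true := hcont.trans hc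
    by_cases hw : pvExt file = "wav"
    · have hda : pvStepA d file = d.insert (pvName file) file := by
        unfold pvStepA; rw [hdc]; simp [hw]
      refine ⟨?_, ?_, ?_, ?_⟩
      · rw [hda, PySem.Dict.keys_insert_of_contains _ _ hdc, hk, hgk]
      · rw [hgk]; exact hnd
      · intro n
        rw [hda, PySem.Dict.getD_insert, hgd n]
        by_cases hn : n = pvName file
        · simp [hn, pvChosen_append _ _ _ hold, hw]
        · simp [hn, hv n]
      · intro n hmem'
        rw [hgd n]
        by_cases hn : n = pvName file
        · simp [hn]
        · simp only [hn, if_false]; exact hne n (by rwa [hgk] at hmem')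
    · have hda : pvStepA d file = d := by unfold pvStepA; rw [hdc]; simp [hw]
      refine ⟨?_, ?_, ?_, ?_⟩
      · rw [hda, hk, hgk]
      · rw [hgk]; exact hnd
      · intro n
        rw [hda, hgd n]
        by_cases hn : n = pvName file
        · rw [hn, if_pos rfl, pvChosen_append _ _ _ hold, if_neg hw]
          exact hv (pvName file)
        · simp [hn, hv n]
      · intro n hmem'
        rw [hgd n]
        by_cases hn : n = pvName file
        · simp [hn]
        · simp only [hn, if_false]; exact hne n (by rwa [hgk] at hmem')
  · have hc' : g.contains (pvName file) = false := by simpa using hc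
    have hdc : d.contains (pvName file) = false := hcont.trans hc'
    have hnmem : pvName file ∉ g.keys := by
      have h := PySem.Dict.contains_eq_decide_mem_keys g (pvName file)
      rw [hc'] at h; exact of_decide_eq_false h.symm
    have hold : g.getD (pvName file) [] = [] := PySem.Dict.getD_of_not_contains g [] hc'
    have hgk : (pvStepB g file).keys = g.keys ++ [pvName file] := by
      unfold pvStepB
      rw [PySem.Dict.keys_modify, PySem.Dict.keys_insert_of_not_contains _ _ hc']
    have hgd : ∀ n, (pvStepB g file).getD n [] =
        if n = pvName file then [(file, pvExt file)] else g.getD n [] := by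
      intro n; unfold pvStepB; rw [PySem.Dict.getD_modify, hold]; simp
    have hda : pvStepA d file = d.insert (pvName file) file := by
      unfold pvStepA; rw [hdc]; simp
    refine ⟨?_, ?_, ?_, ?_⟩
    · rw [hda, PySem.Dict.keys_insert_of_not_contains _ _ hdc, hk, hgk]
    · rw [hgk]
      simp only [List.nodup_append, List.nodup_cons, List.nodup_nil, and_true]
      refine ⟨hnd, by simp, fun a ha b hb hab => hnmem ?_⟩
      simp only [List.mem_singleton] at hb
      rw [← hb, ← hab]; exact ha
    · intro n
      rw [hda, PySem.Dict.getD_insert, hgd n]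
      by_cases hn : n = pvName file
      · simp [hn, pvChosen, pvChoose]
      · simp [hn, hv n]
    · intro n hmem'
      rw [hgd n]
      by_cases hn : n = pvName file
      · simp [hn]
      · simp only [hn, if_false]
        refine hne n ?_
        rw [hgk] at hmem'
        simpa [hn] using hmem'


-- the invariant carried through the whole fold
theorem pv_loop (files : List String) (d : PySem.Dict String String)
    (g : PySem.Dict String (List (String × String)))
    (hk : d.keys = g.keys) (hnd : g.keys.Nodup)
    (hv : ∀ n, d.getD n "" = pvChosen (g.getD n []))
    (hne : ∀ n, n ∈ g.keys → g.getD n [] ≠ []) :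
    (files.foldl pvStepA d).keys = (files.foldl pvStepB g).keys ∧
    (files.foldl pvStepB g).keys.Nodup ∧
    (∀ n, (files.foldl pvStepA d).getD n "" = pvChosen ((files.foldl pvStepB g).getD n [])) ∧
    (∀ n, n ∈ (files.foldl pvStepB g).keys → (files.foldl pvStepB g).getD n [] ≠ []) := by
  induction files generalizing d g with
  | nil => exact ⟨hk, hnd, hv, hne⟩
  | cons f rest ih =>
    obtain ⟨hk', hnd', hv', hne'⟩ := pv_step d g f hk hnd hv hne
    exact ih _ _ hk' hnd' hv' hne'

-- ===== VERDICT (by name: the statement is the Claim_ definition above) =====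
theorem make_files_distinct_spec : Claim_equal_make_files_distinct := by
  intro files _ _
  unfold Spec_make_files_distinct make_files_distinct make_files_distinct_alt
  obtain ⟨hk, hnd, hv, hne⟩ := pv_loop files PySem.Dict.empty PySem.Dict.empty
    (by simp) PySem.Dict.nodup_keys_empty
    (by intro n; simp [pvChosen, PySem.Dict.getD_empty])
    (by intro n hn; simp [PySem.Dict.keys_empty] at hn)
  set dF := files.foldl pvStepA PySem.Dict.empty with hdF
  set gF := files.foldl pvStepB PySem.Dict.empty with hgF
  show dF.values = (gF.items.foldl pvStepR PySem.Dict.empty).values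
  have hndA : dF.keys.Nodup := hk ▸ hnd
  have hcg : ∀ (acc : PySem.Dict String String), ∀ p ∈ gF.items,
      pvStepR acc p = acc.insert p.1 (pvChosen p.2) := by
    intro r p hp
    have hpp : (p.1, p.2) ∈ gF.items := by rwa [Prod.mk.eta]
    have hne2 : p.2 ≠ [] := by
      have h1 : p.1 ∈ gF.keys := PySem.Dict.mem_keys_of_mem_items _ hp
      have h2 : gF.getD p.1 [] = p.2 := PySem.Dict.getD_of_mem_items _ hpp hnd []
      rw [← h2]; exact hne _ h1
    cases hp2 : p.2 with
    | nil => exact absurd hp2 hne2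
    | cons fe rest => simp [pvStepR, hp2, pvChosen]
  have hres : gF.items.foldl pvStepR PySem.Dict.empty
      = gF.items.foldl (fun r p => r.insert p.1 (pvChosen p.2)) PySem.Dict.empty :=
    PySem.List.foldl_congr_mem _ _ _ _ hcg
  have hkeysmap : gF.items.map Prod.fst = gF.keys := rfl
  have hfresh := PySem.Dict.items_foldl_insert_fresh gF.items Prod.fst
    (fun p => pvChosen p.2) PySem.Dict.empty
    (by intro a _; simp [PySem.Dict.contains_empty])
    (by rw [hkeysmap]; exact hnd)
  have hAv : dF.values = dF.keys.map (fun k => dF.getD k "") :=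
    PySem.Dict.values_eq_map_keys dF hndA ""
  have hBi : gF.items = gF.keys.map (fun k => (k, gF.getD k [])) :=
    PySem.Dict.items_eq_map_keys gF hnd []
  rw [hAv, hres]
  have hvals : (gF.items.foldl (fun r p => r.insert p.1 (pvChosen p.2)) PySem.Dict.empty).values
      = (gF.items.foldl (fun r p => r.insert p.1 (pvChosen p.2)) PySem.Dict.empty).items.map Prod.snd := rfl
  rw [hvals, hfresh]
  rw [hk]
  conv_rhs => rw [hBi]
  have hemp : (PySem.Dict.empty : PySem.Dict String String).items = [] := rfl
  rw [hemp, List.nil_append, List.map_map, List.map_map]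
  refine List.map_congr_left (fun k _ => ?_)
  simp only [Function.comp_apply]
  exact hv k
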